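-- pv_equiv track=rewrite | github.com/agespino/miniproject3 | HMM_helper.py | parse_observations
-- ===== SOURCE A (Python) =====
-- def parse_observations(text):
--     # Convert text to dataset.
--     lines = [line.split() for line in text.split('\n') if line.split()]
--
--     obs_counter = 0
--     obs = []
--     obs_map = {}
--
--     for line in lines:
--         obs_elem = []
--         if len(line) == 1:
--             continue
--         for word in line:
--             word = ''.join([char for char in word if char in "abcdefghijklmnopqrstuvwxyzABCDEFGHIJKLMNOPQRSTUVWXYZ\'-"]).lower()
--             if word not in obs_map:
--                 # Add unique words to the observations map.
--                 obs_map[word] = obs_counter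
--                 obs_counter += 1
--
--             # Add the encoded word.
--             obs_elem.append(obs_map[word])
--
--         # Add the encoded sequence.
--         obs.append(obs_elem)
--
--     return obs, obs_map
-- ===== SOURCE B (Python) =====
-- ALLOWED = set("abcdefghijklmnopqrstuvwxyzABCDEFGHIJKLMNOPQRSTUVWXYZ'-")
--
-- def _clean(word):
--     return ''.join(c for c in word if c in ALLOWED).lower()
--
-- def parse_observations(text):
--     # Keep only multi-word lines, cleaning every word up front.
--     cleaned = [[_clean(w) for w in line.split()] for line in text.split('\n')]
--     cleaned = [ws for ws in cleaned if len(ws) > 1]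
--     # First pass: build the vocabulary in first-appearance order.
--     obs_map = {}
--     for ws in cleaned:
--         for w in ws:
--             if w not in obs_map:
--                 obs_map[w] = len(obs_map)
--     # Second pass: encode every kept line with the finished map.
--     obs = [[obs_map[w] for w in ws] for ws in cleaned]
--     return obs, obs_map
-- ===== Notes on version B (the rewrite author's own statement) =====
-- stated objective: simpler
-- what changed: A interleaves map-building and encoding in one loop with a manual counter and per-line continue; B cleans and filters the kept lines up front, builds the vocabulary in a first pass keyed by len(obs_map), then encodes every line in a second pass against the finished map.
import Mathlib
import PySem

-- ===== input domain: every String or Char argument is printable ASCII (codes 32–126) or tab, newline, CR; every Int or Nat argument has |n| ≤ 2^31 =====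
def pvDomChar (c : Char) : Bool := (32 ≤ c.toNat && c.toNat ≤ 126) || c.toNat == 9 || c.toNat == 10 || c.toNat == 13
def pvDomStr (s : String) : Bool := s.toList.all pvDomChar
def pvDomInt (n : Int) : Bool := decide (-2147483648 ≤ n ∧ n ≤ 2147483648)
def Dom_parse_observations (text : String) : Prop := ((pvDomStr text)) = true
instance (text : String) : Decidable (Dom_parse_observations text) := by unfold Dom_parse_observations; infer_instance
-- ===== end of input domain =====

-- B re-decomposes A's single interleaved loop into two passes over the kept lines
-- (build the vocabulary first, then encode with the finished map); objective: simpler, same cost.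

-- ===== PORT A =====
-- text.split('\n'): exact via PySem.Chars.splitOn (separator is the non-empty literal "\n")
def pvSplitNL (text : String) : List String :=
  (PySem.Chars.splitOn text.toList ['\n']).map String.ofList

-- the allowed-character filter + lowercase applied to one word (identical expression in both Pythons)
def pvClean (word : String) : String :=
  PySem.Str.lower (String.ofList (word.toList.filter
    (fun c => "abcdefghijklmnopqrstuvwxyzABCDEFGHIJKLMNOPQRSTUVWXYZ'-".toList.contains c)))

-- inner 'for word in line' body of A
def pvAInner (st : Int × PySem.Dict String Int × List Int) (word : String) :
    Int × PySem.Dict String Int × List Int :=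
  let w := pvClean word
  let (cnt, m, elem) := st
  if m.contains w then (cnt, m, elem ++ [m.getD w 0])
  else (cnt + 1, m.insert w cnt, elem ++ [(m.insert w cnt).getD w 0])

-- outer 'for line in lines' body of A (continue on single-token lines)
def pvAOuter (st : Int × PySem.Dict String Int × List (List Int)) (line : List String) :
    Int × PySem.Dict String Int × List (List Int) :=
  let (cnt, m, obs) := st
  if line.length = 1 then st
  else
    let r := line.foldl pvAInner (cnt, m, [])
    (r.1, r.2.1, obs ++ [r.2.2])

def parse_observations (text : String) : List (List Int) × (List (String × Int)) :=
  let lines := ((pvSplitNL text).map PySem.Str.split₀).filter (fun l => l ≠ [])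
  let r := lines.foldl pvAOuter (0, PySem.Dict.empty, [])
  (r.2.2, r.2.1.items)

-- ===== PORT B =====
-- 'if w not in obs_map: obs_map[w] = len(obs_map)'
def pvBAdd (d : PySem.Dict String Int) (w : String) : PySem.Dict String Int :=
  if d.contains w then d else d.insert w (Int.ofNat d.size)

def parse_observations_alt (text : String) : List (List Int) × (List (String × Int)) :=
  let cleaned := ((pvSplitNL text).map
      (fun l => (PySem.Str.split₀ l).map pvClean)).filter (fun ws => 1 < ws.length)
  let m := cleaned.foldl (fun d ws => ws.foldl pvBAdd d) PySem.Dict.empty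
  (cleaned.map (fun ws => ws.map (fun w => m.getD w 0)), m.items)

-- ===== PRECONDITION & SPEC =====
def Spec_parse_observations (text : String) (out : List (List Int) × (List (String × Int))) : Prop := out = parse_observations_alt text
instance (text : String) (out : List (List Int) × (List (String × Int))) : Decidable (Spec_parse_observations text out) := by unfold Spec_parse_observations; infer_instance

-- ===== CLAIM (what is proved, stated in full; the proofs are below) =====
def Claim_equal_parse_observations : Prop := ∀ (text : String), Dom_parse_observations text → Spec_parse_observations text (parse_observations text)

-- ===== LEMMAS AND PROOFS =====

-- B's vocabulary-building fold over one line / over many lines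
def bline (d : PySem.Dict String Int) (ws : List String) : PySem.Dict String Int :=
  ws.foldl pvBAdd d

def bmap (d : PySem.Dict String Int) (wss : List (List String)) : PySem.Dict String Int :=
  wss.foldl bline d

-- A's inner step on an already-cleaned word
def aW (st : Int × PySem.Dict String Int × List Int) (w : String) :
    Int × PySem.Dict String Int × List Int :=
  let (cnt, m, elem) := st
  if m.contains w then (cnt, m, elem ++ [m.getD w 0])
  else (cnt + 1, m.insert w cnt, elem ++ [(m.insert w cnt).getD w 0])

-- A's outer step on an already-cleaned, kept line
def aLine (st : Int × PySem.Dict String Int × List (List Int)) (ws : List String) :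
    Int × PySem.Dict String Int × List (List Int) :=
  let (cnt, m, obs) := st
  let r := ws.foldl aW (cnt, m, [])
  (r.1, r.2.1, obs ++ [r.2.2])

theorem get?_pvBAdd_of_some (d : PySem.Dict String Int) (u w : String) (v : Int)
    (h : d.get? w = some v) : (pvBAdd d u).get? w = some v := by
  unfold pvBAdd
  split_ifs with hc
  · exact h
  · rcases eq_or_ne w u with rfl | hne
    · rw [(PySem.Dict.get?_eq_none_iff_contains d w).mpr (by simp [hc])] at h; cases h
    · rw [PySem.Dict.get?_insert_of_ne _ _ hne]; exact h

theorem get?_bline_of_some (ws : List String) (d : PySem.Dict String Int) (w : String) (v : Int)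
    (h : d.get? w = some v) : (bline d ws).get? w = some v := by
  induction ws generalizing d with
  | nil => exact h
  | cons u rest ih => exact ih _ (get?_pvBAdd_of_some d u w v h)

theorem get?_bmap_of_some (wss : List (List String)) (d : PySem.Dict String Int) (w : String) (v : Int)
    (h : d.get? w = some v) : (bmap d wss).get? w = some v := by
  induction wss generalizing d with
  | nil => exact h
  | cons ws rest ih => exact ih _ (get?_bline_of_some ws d w v h)

theorem contains_pvBAdd_self (d : PySem.Dict String Int) (w : String) :
    (pvBAdd d w).contains w = true := by
  unfold pvBAdd
  split_ifs with h
  · exact h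
  · exact PySem.Dict.contains_insert_self d w _

theorem contains_bline_of_contains (ws : List String) (d : PySem.Dict String Int) (w : String)
    (h : d.contains w = true) : (bline d ws).contains w = true := by
  rw [PySem.Dict.contains_eq_isSome_get? d w] at h
  rcases Option.isSome_iff_exists.mp h with ⟨v, hv⟩
  rw [PySem.Dict.contains_eq_isSome_get? (bline d ws) w, get?_bline_of_some ws d w v hv]
  rfl

theorem contains_bline_of_mem (ws : List String) (d : PySem.Dict String Int) (w : String)
    (h : w ∈ ws) : (bline d ws).contains w = true := by
  induction ws generalizing d with
  | nil => cases h
  | cons u rest ih =>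
    rcases List.mem_cons.mp h with rfl | hm
    · exact contains_bline_of_contains rest (pvBAdd d w) w (contains_pvBAdd_self d w)
    · exact ih _ hm

theorem getD_bline_bmap (ws : List String) (rest : List (List String))
    (d : PySem.Dict String Int) (w : String) (h : w ∈ ws) :
    (bline d ws).getD w 0 = (bmap (bline d ws) rest).getD w 0 := by
  have hc := contains_bline_of_mem ws d w h
  rw [PySem.Dict.contains_eq_isSome_get?] at hc
  rcases Option.isSome_iff_exists.mp hc with ⟨v, hv⟩
  rw [PySem.Dict.getD_of_get?_eq_some _ 0 hv,
      PySem.Dict.getD_of_get?_eq_some _ 0 (get?_bmap_of_some rest _ w v hv)]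

theorem aW_loop (ws : List String) (m : PySem.Dict String Int) (e : List Int)
    (cnt : Int) (hc : cnt = Int.ofNat m.size) :
    ws.foldl aW (cnt, m, e) =
      (Int.ofNat (bline m ws).size, bline m ws, e ++ ws.map (fun w => (bline m ws).getD w 0)) := by
  induction ws generalizing cnt m e with
  | nil => simp [bline, hc]
  | cons w rest ih =>
    have hstep : bline m (w :: rest) = bline (pvBAdd m w) rest := rfl
    by_cases hcont : m.contains w = true
    · have hAdd : pvBAdd m w = m := by unfold pvBAdd; simp [hcont]
      have hcont' : (m.get? w).isSome = true := by
        rw [← PySem.Dict.contains_eq_isSome_get? m w]; exact hcont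
      rcases Option.isSome_iff_exists.mp hcont' with ⟨v, hv⟩
      have hval : m.getD w 0 = (bline m (w :: rest)).getD w 0 := by
        rw [PySem.Dict.getD_of_get?_eq_some _ 0 hv,
            PySem.Dict.getD_of_get?_eq_some _ 0 (get?_bline_of_some (w :: rest) m w v hv)]
      simp only [List.foldl_cons, aW, hcont, if_true]
      rw [ih m (e ++ [m.getD w 0]) cnt hc]
      rw [hstep, hAdd] at hval ⊢
      simp [hval]
    · have hAdd : pvBAdd m w = m.insert w cnt := by
        unfold pvBAdd; simp [hcont, hc]
      have hv : (m.insert w cnt).get? w = some cnt := PySem.Dict.get?_insert_self m w cnt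
      have hsz : Int.ofNat (m.insert w cnt).size = cnt + 1 := by
        rw [PySem.Dict.size_insert]
        simp [hcont, hc]
      have hval : (m.insert w cnt).getD w 0 = (bline m (w :: rest)).getD w 0 := by
        rw [PySem.Dict.getD_of_get?_eq_some _ 0 hv, hstep, hAdd,
            PySem.Dict.getD_of_get?_eq_some _ 0 (get?_bline_of_some rest _ w cnt hv)]
      simp only [List.foldl_cons, aW]
      rw [if_neg (by simp [hcont]),
          ih (m.insert w cnt) (e ++ [(m.insert w cnt).getD w 0]) (cnt + 1) hsz.symm]
      rw [hstep, hAdd] at hval ⊢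
      simp [hval]

theorem aLine_loop (wss : List (List String)) (m : PySem.Dict String Int)
    (obs : List (List Int)) (cnt : Int) (hc : cnt = Int.ofNat m.size) :
    wss.foldl aLine (cnt, m, obs) =
      (Int.ofNat (bmap m wss).size, bmap m wss,
        obs ++ wss.map (fun ws => ws.map (fun w => (bmap m wss).getD w 0))) := by
  induction wss generalizing cnt m obs with
  | nil => simp [bmap, hc]
  | cons ws rest ih =>
    have hstep : bmap m (ws :: rest) = bmap (bline m ws) rest := rfl
    simp only [List.foldl_cons]
    have h1 : aLine (cnt, m, obs) ws =
        (Int.ofNat (bline m ws).size, bline m ws,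
          obs ++ [ws.map (fun w => (bline m ws).getD w 0)]) := by
      simp [aLine, aW_loop ws m [] cnt hc]
    rw [h1, ih (bline m ws) _ _ rfl, hstep]
    have hmc : ws.map (fun w => (bline m ws).getD w 0)
        = ws.map (fun w => (bmap (bline m ws) rest).getD w 0) :=
      List.map_congr_left (fun w hw => getD_bline_bmap ws rest m w hw)
    rw [hmc]
    simp

-- ===== VERDICT (by name: the statement is the Claim_ definition above) =====
theorem parse_observations_spec : Claim_equal_parse_observations := by
  intro text _
  unfold Spec_parse_observations parse_observations parse_observations_alt
  set L := (pvSplitNL text).map PySem.Str.split₀ with hL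
  -- A's fold: rewrite pvAInner / pvAOuter to the cleaned-word forms
  have houter : ∀ st line, pvAOuter st line =
      if line.length = 1 then st else aLine st (line.map pvClean) := by
    intro st line
    obtain ⟨cnt, m, obs⟩ := st
    by_cases h1 : line.length = 1
    · simp [pvAOuter, h1]
    · simp only [pvAOuter, aLine, h1, if_false, List.foldl_map]
      rfl
  have hA : (L.filter (fun l => l ≠ [])).foldl pvAOuter (0, PySem.Dict.empty, []) =
      ((L.filter (fun l => 1 < l.length)).map (List.map pvClean)).foldl aLine
        (0, PySem.Dict.empty, []) := by
    have hcongr := PySem.List.foldl_congr_mem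
      (l := L.filter (fun l => l ≠ []))
      (init := ((0 : Int), PySem.Dict.empty, ([] : List (List Int))))
      (f := pvAOuter)
      (g := fun st l => if ¬ l.length = 1 then aLine st (l.map pvClean) else st)
      (fun st l _ => by rw [houter st l]; by_cases h1 : l.length = 1 <;> simp [h1])
    rw [hcongr]
    rw [PySem.List.foldl_ite_eq_foldl_filter (p := fun l : List String => ¬ l.length = 1)
        (f := fun st l => aLine st (l.map pvClean))]
    rw [List.filter_filter, List.foldl_map]
    congr 1
    apply List.filter_congr
    intro l _
    cases l with
    | nil => simp
    | cons a t => cases t <;> simp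
  -- B's kept lines: filtering after cleaning = cleaning after filtering
  have hB : ((L.map (List.map pvClean)).filter (fun ws => 1 < ws.length)) =
      (L.filter (fun l => 1 < l.length)).map (List.map pvClean) := by
    rw [List.filter_map]
    congr 1
    apply List.filter_congr
    intro l _
    simp [Function.comp]
  have hcomp : (pvSplitNL text).map (fun l => (PySem.Str.split₀ l).map pvClean)
      = L.map (List.map pvClean) := by
    rw [hL, List.map_map]
    rfl
  dsimp only
  rw [hcomp, hB, hA]
  set W := (L.filter (fun l => 1 < l.length)).map (List.map pvClean) with hW
  have hfold : W.foldl (fun d ws => ws.foldl pvBAdd d) PySem.Dict.empty = bmap PySem.Dict.empty W := rfl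
  rw [aLine_loop W PySem.Dict.empty [] 0 (by simp [PySem.Dict.size_empty]), hfold]
  simp
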